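-- pv_equiv track=rewrite | github.com/yarang/agent_com | src/mcp_broker/core/security.py | validate_session_token
-- ===== SOURCE A (Python) =====
-- def validate_session_token(token: str, _max_age_seconds: int = 3600) -> bool:
--     """Validate a session token and its age.
--
--     Args:
--         token: Token string to validate
--         _max_age_seconds: Maximum age of token in seconds (unused, for future implementation)
--
--     Returns:
--         True if token is valid and not expired
--     """
--     if not token or len(token) < 32:
--         return False
--
--     # For now, simple validation - in production, check against token store
--     # Token format validation (base64url encoded)
--     try:
--         # Ensure token only contains valid characters
--         valid_chars = set("ABCDEFGHIJKLMNOPQRSTUVWXYZabcdefghijklmnopqrstuvwxyz0123456789-_")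
--         return all(c in valid_chars for c in token)
--     except Exception:
--         return False
-- ===== SOURCE B (Python) =====
-- import re
--
-- _TOKEN_RE = re.compile(r'[A-Za-z0-9_-]{32,}')
--
-- def validate_session_token(token: str, _max_age_seconds: int = 3600) -> bool:
--     """Validate a session token: base64url characters, at least 32 of them."""
--     return _TOKEN_RE.fullmatch(token) is not None
-- ===== Notes on version B (the rewrite author's own statement) =====
-- stated objective: idiomatic
-- what changed: Replaced the length guard plus a per-character membership test against a 64-character set with a single precompiled regular expression fullmatch r'[A-Za-z0-9_-]{32,}', whose {32,} quantifier subsumes the emptiness and length checks. The precompiled regex runs the scan inside the C regex engine rather than a Python-level generator, giving a constant-factor speedup.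
import Mathlib
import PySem

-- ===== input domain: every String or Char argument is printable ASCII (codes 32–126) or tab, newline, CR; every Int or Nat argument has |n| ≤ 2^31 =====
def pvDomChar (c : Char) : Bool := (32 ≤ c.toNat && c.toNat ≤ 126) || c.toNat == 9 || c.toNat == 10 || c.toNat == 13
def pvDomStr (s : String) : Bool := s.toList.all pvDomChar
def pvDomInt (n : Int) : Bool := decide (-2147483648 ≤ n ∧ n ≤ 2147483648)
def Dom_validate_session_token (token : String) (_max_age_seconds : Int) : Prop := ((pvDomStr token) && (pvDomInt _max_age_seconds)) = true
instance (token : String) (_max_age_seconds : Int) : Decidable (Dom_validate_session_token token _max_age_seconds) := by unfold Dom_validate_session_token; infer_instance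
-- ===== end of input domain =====

-- B replaces A's length guard + per-character set membership with a single regex fullmatch
-- r'[A-Za-z0-9_-]{32,}' (ported as its exact meaning: length ≥ 32 and every char in the class); objective: idiomatic.

-- ===== PORT A =====
-- valid_chars = set("ABC…_-")  (built once inside the try block)
def pvValidChars : PySem.Set Char :=
  PySem.Set.ofList "ABCDEFGHIJKLMNOPQRSTUVWXYZabcdefghijklmnopqrstuvwxyz0123456789-_".toList

def validate_session_token (token : String) (_max_age_seconds : Int) : Bool :=
  -- if not token or len(token) < 32: return False
  if token.toList = [] ∨ PySem.Str.len token < 32 then false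
  -- return all(c in valid_chars for c in token)
  else token.toList.all (fun c => PySem.Set.contains pvValidChars c)

-- ===== PORT B =====
-- the regex character class [A-Za-z0-9_-]
def pvB64Char (c : Char) : Bool :=
  ('A' ≤ c && c ≤ 'Z') || ('a' ≤ c && c ≤ 'z') || ('0' ≤ c && c ≤ '9') || c == '_' || c == '-'

-- re.fullmatch(r'[A-Za-z0-9_-]{32,}', token) is not None, ported as the regex's exact meaning
def validate_session_token_alt (token : String) (_max_age_seconds : Int) : Bool :=
  decide (32 ≤ token.toList.length) && token.toList.all pvB64Char

-- ===== PRECONDITION & SPEC =====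
def Spec_validate_session_token (token : String) (_max_age_seconds : Int) (out : Bool) : Prop := out = validate_session_token_alt token _max_age_seconds
instance (token : String) (_max_age_seconds : Int) (out : Bool) : Decidable (Spec_validate_session_token token _max_age_seconds out) := by unfold Spec_validate_session_token; infer_instance

-- ===== CLAIM (what is proved, stated in full; the proofs are below) =====
def Claim_equal_validate_session_token : Prop := ∀ (token : String) (_max_age_seconds : Int), Dom_validate_session_token token _max_age_seconds → Spec_validate_session_token token _max_age_seconds (validate_session_token token _max_age_seconds)

-- ===== LEMMAS AND PROOFS =====

-- per-character agreement of the two tests, for every char the domain admits (code < 128)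
theorem pvAll_congr {l : List Char} {f g : Char → Bool} (h : ∀ x ∈ l, f x = g x) :
    l.all f = l.all g := by
  induction l with
  | nil => rfl
  | cons a t ih =>
    simp only [List.all_cons, h a (List.mem_cons_self), ih fun x hx => h x (List.mem_cons_of_mem a hx)]

set_option maxRecDepth 8192 in
theorem pvChar_agree (c : Char) (h : c.toNat < 128) :
    PySem.Set.contains pvValidChars c = pvB64Char c := by
  have key : ∀ i : Fin 128,
      PySem.Set.contains pvValidChars (Char.ofNat i.val) = pvB64Char (Char.ofNat i.val) := by decide
  have := key ⟨c.toNat, h⟩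
  rwa [Char.ofNat_toNat c] at this

theorem validate_session_token_spec : Claim_equal_validate_session_token := by
  intro token m hdom
  unfold Spec_validate_session_token validate_session_token validate_session_token_alt
  have hdomc : ∀ c ∈ token.toList, c.toNat < 128 := by
    intro c hc
    have : pvDomStr token = true := by
      have := hdom; unfold Dom_validate_session_token at this
      simp at this; exact this.1
    unfold pvDomStr at this
    have := List.all_eq_true.mp this c hc
    unfold pvDomChar at this
    simp at this
    omega
  have hall : token.toList.all (fun c => PySem.Set.contains pvValidChars c)
      = token.toList.all pvB64Char :=
    pvAll_congr (fun c hc => pvChar_agree c (hdomc c hc))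
  rw [PySem.Str.len_eq]
  by_cases hlen : 32 ≤ token.toList.length
  · have hne : ¬(token.toList = [] ∨ (token.toList.length : Int) < 32) := by
      push Not
      constructor
      · intro h; rw [h] at hlen; simp at hlen
      · exact_mod_cast hlen
    rw [if_neg hne, hall, decide_eq_true hlen, Bool.true_and]
  · have : token.toList = [] ∨ (token.toList.length : Int) < 32 := by
      right; exact_mod_cast Nat.lt_of_not_le hlen
    rw [if_pos this, decide_eq_false hlen, Bool.false_and]
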